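-- pv_equiv track=rewrite | github.com/theradro/paa_tp1 | main.py | create_w_matrix
-- ===== SOURCE A (Python) =====
-- def create_w_matrix(adjacency_list, n):
--     W = []
--     PI = []
--     for i in range(n):
--         row = []
--         pi_row = []
--         if (i+1) in list(adjacency_list):
--             for j in range(n):
--                 if i == j:
--                     row.append(0)
--                     pi_row.append(0)
--                 else:
--                     if (j+1) in list(adjacency_list[i+1]):
--                         row.append(adjacency_list[i+1][j+1])
--                         pi_row.append(i+1)
--                     else:
--                         row.append(9999)
--                         pi_row.append(0)
--         else:
--             for j in range(n):
--                 if i == j: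
--                     row.append(0)
--                     pi_row.append(0)
--                 else:
--                     row.append(9999)
--                     pi_row.append(0)
--         W.append(row)
--         PI.append(pi_row)
--     return W, PI
-- ===== SOURCE B (Python) =====
-- def create_w_matrix(adjacency_list, n):
--     W = [[0 if i == j else 9999 for j in range(n)] for i in range(n)]
--     PI = [[0] * n for _ in range(n)]
--     for u, nbrs in adjacency_list.items():
--         if 1 <= u <= n:
--             for v, w in nbrs.items():
--                 if 1 <= v <= n and v != u:
--                     W[u - 1][v - 1] = w
--                     PI[u - 1][v - 1] = u
--     return W, PI
-- ===== Notes on version B (the rewrite author's own statement) =====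
-- stated objective: alternative
-- what changed: A scans a dense n x n grid per node with membership tests and dict lookups for every cell; B first fills default matrices (0 diagonal / 9999, PI all zeros) and then makes one sparse pass over the adjacency dict's edges, writing only the cells of in-range non-self edges. Pre_ excludes association lists with duplicate outer or inner keys, which cannot arise from a Python dict and on which A's first-match lookup vs B's overwrite order is accidental.
import Mathlib
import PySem

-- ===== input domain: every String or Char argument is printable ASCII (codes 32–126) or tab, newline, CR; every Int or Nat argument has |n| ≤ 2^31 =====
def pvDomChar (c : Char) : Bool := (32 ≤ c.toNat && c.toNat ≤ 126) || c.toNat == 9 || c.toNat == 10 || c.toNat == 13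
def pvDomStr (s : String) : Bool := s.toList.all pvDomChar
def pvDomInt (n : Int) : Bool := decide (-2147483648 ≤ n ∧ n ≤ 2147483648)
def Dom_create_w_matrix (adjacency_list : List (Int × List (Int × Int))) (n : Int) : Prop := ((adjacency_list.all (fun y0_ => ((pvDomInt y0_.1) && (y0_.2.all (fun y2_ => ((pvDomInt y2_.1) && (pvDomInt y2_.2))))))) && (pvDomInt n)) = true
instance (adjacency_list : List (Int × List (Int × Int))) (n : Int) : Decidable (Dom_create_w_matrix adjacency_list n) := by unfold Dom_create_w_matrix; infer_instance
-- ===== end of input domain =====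

-- B replaces A's dense per-node n×n scan with a default fill plus one sparse pass over the edges (alternative shape, same results).

-- ===== PORT A =====
def create_w_matrix (adjacency_list : List (Int × List (Int × Int))) (n : Int) : List (List Int) × List (List Int) :=
  (PySem.List.pyRange 0 n 1).foldl (fun WPI i =>
    let rp : List Int × List Int :=
      if (PySem.Dict.mk adjacency_list).contains (i + 1) then
        let d : PySem.Dict Int Int := PySem.Dict.mk (((PySem.Dict.mk adjacency_list).get? (i + 1)).getD [])
        (PySem.List.pyRange 0 n 1).foldl (fun rp j =>
          if i == j then (rp.1 ++ [0], rp.2 ++ [0])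
          else if d.contains (j + 1) then (rp.1 ++ [(d.get? (j + 1)).getD 0], rp.2 ++ [i + 1])
          else (rp.1 ++ [9999], rp.2 ++ [0])) ([], [])
      else
        (PySem.List.pyRange 0 n 1).foldl (fun rp j =>
          if i == j then (rp.1 ++ [0], rp.2 ++ [0]) else (rp.1 ++ [9999], rp.2 ++ [0])) ([], [])
    (WPI.1 ++ [rp.1], WPI.2 ++ [rp.2])) ([], [])

-- ===== PORT B =====
def create_w_matrix_alt (adjacency_list : List (Int × List (Int × Int))) (n : Int) : List (List Int) × List (List Int) :=
  adjacency_list.foldl (fun WPI e =>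
    if 1 ≤ e.1 ∧ e.1 ≤ n then
      e.2.foldl (fun WPI p =>
        if 1 ≤ p.1 ∧ p.1 ≤ n ∧ p.1 ≠ e.1 then
          (WPI.1.set (e.1 - 1).toNat ((WPI.1[(e.1 - 1).toNat]!).set (p.1 - 1).toNat p.2),
           WPI.2.set (e.1 - 1).toNat ((WPI.2[(e.1 - 1).toNat]!).set (p.1 - 1).toNat e.1))
        else WPI) WPI
    else WPI)
    ((PySem.List.pyRange 0 n 1).map (fun i => (PySem.List.pyRange 0 n 1).map (fun j => if i == j then 0 else 9999)),
     (PySem.List.pyRange 0 n 1).map (fun _ => List.replicate n.toNat 0))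

-- ===== PRECONDITION & SPEC =====
-- Pre_ excludes association lists with duplicate outer or inner keys: those cannot arise
-- from a Python dict, and on them A's first-match lookup vs B's last-write order is accidental.
def Pre_create_w_matrix (adjacency_list : List (Int × List (Int × Int))) (n : Int) : Prop :=
  (adjacency_list.map Prod.fst).Nodup ∧ ∀ e ∈ adjacency_list, (e.2.map Prod.fst).Nodup
instance (adjacency_list : List (Int × List (Int × Int))) (n : Int) : Decidable (Pre_create_w_matrix adjacency_list n) := by unfold Pre_create_w_matrix; infer_instance
def pvWitness_create_w_matrix : (List (Int × List (Int × Int))) × Int := ([(1, [(2, 3)])], 2)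
def Spec_create_w_matrix (adjacency_list : List (Int × List (Int × Int))) (n : Int) (out : List (List Int) × List (List Int)) : Prop := out = create_w_matrix_alt adjacency_list n
instance (adjacency_list : List (Int × List (Int × Int))) (n : Int) (out : List (List Int) × List (List Int)) : Decidable (Spec_create_w_matrix adjacency_list n out) := by unfold Spec_create_w_matrix; infer_instance

-- ===== CLAIM (what is proved, stated in full; the proofs are below) =====
def Claim_equal_create_w_matrix : Prop := ∀ (adjacency_list : List (Int × List (Int × Int))) (n : Int), Dom_create_w_matrix adjacency_list n → Pre_create_w_matrix adjacency_list n → Spec_create_w_matrix adjacency_list n (create_w_matrix adjacency_list n)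

-- ===== LEMMAS AND PROOFS =====

-- A pair-state fold whose step acts componentwise splits into two folds.
theorem pvFoldPair {α β γ : Type} (l : List α) (f : β → α → β) (g : γ → α → γ) (x : β) (y : γ) :
    l.foldl (fun s e => (f s.1 e, g s.2 e)) (x, y) = (l.foldl f x, l.foldl g y) := by
  induction l generalizing x y with
  | nil => rfl
  | cons a l ih => simpa using ih (f x a) (g y a)

-- A pair fold that appends one element per step is a pair of maps.
theorem pvFoldAppend {α β : Type} (l : List α) (f g : α → β) (x y : List β) :
    l.foldl (fun s e => (s.1 ++ [f e], s.2 ++ [g e])) (x, y) = (x ++ l.map f, y ++ l.map g) := by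
  induction l generalizing x y with
  | nil => simp
  | cons a l ih => simpa using ih (x ++ [f a]) (y ++ [g a])

theorem pvFoldAppendGen {α β : Type} (l : List α) (f : (List β × List β) → α → (List β × List β))
    (F G : α → β) (hf : ∀ s e, f s e = (s.1 ++ [F e], s.2 ++ [G e])) (x y : List β) :
    l.foldl f (x, y) = (x ++ l.map F, y ++ l.map G) := by
  have : f = fun s e => (s.1 ++ [F e], s.2 ++ [G e]) := funext fun s => funext fun e => hf s e
  rw [this, pvFoldAppend]

theorem pvSetGetBang {β : Type} [Inhabited β] (L : List β) (k : ℕ) : L.set k (L[k]!) = L := by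
  induction L generalizing k with
  | nil => rfl
  | cons a L ih =>
    cases k with
    | zero => simp [List.getElem!_eq_getElem?_getD]
    | succ k =>
      simp only [List.set_cons_succ, List.cons.injEq, true_and]
      simpa [List.getElem!_eq_getElem?_getD] using ih k

-- A fold whose every step modifies only row k equals one set of row k with the cell fold.
theorem pvFoldRow {α : Type} (es : List α) (k : ℕ) (g : α → Prop) [DecidablePred g]
    (idx : α → ℕ) (valf : α → Int) (L : List (List Int)) :
    es.foldl (fun L p => if g p then L.set k ((L[k]!).set (idx p) (valf p)) else L) L
      = L.set k (es.foldl (fun r p => if g p then r.set (idx p) (valf p) else r) (L[k]!)) := by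
  induction es generalizing L with
  | nil => simpa [List.getElem!_eq_getElem?_getD] using (pvSetGetBang L k).symm
  | cons p es ih =>
    by_cases hg : g p
    · simp only [List.foldl_cons, if_pos hg]
      by_cases hk : k < L.length
      · rw [ih]
        have h1 : (L.set k ((L[k]!).set (idx p) (valf p)))[k]! = (L[k]!).set (idx p) (valf p) := by
          simp [List.getElem!_eq_getElem?_getD, List.getElem?_set_self', hk,
            List.getElem?_eq_getElem hk]
        rw [h1, List.set_set]
      · have hk' : L.length ≤ k := Nat.le_of_not_lt hk
        rw [List.set_eq_of_length_le hk', ih, List.set_eq_of_length_le hk',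
          List.set_eq_of_length_le hk']
    · simp only [List.foldl_cons, if_neg hg]
      exact ih L

-- Characterisation of a fold of guarded row writes at index (key-1) over distinct keys.
theorem pvFoldSetGet {α β : Type} [Inhabited β] (es : List α) (key : α → Int)
    (val : α → β → β) (P : Int → Prop) [DecidablePred P] (hP : ∀ k, P k → 1 ≤ k)
    (h : (es.map key).Nodup) (L : List β) (i : ℕ) :
    (es.foldl (fun L e => if P (key e) then L.set (key e - 1).toNat (val e (L[(key e - 1).toNat]!)) else L) L)[i]?
      = match es.find? (fun e => key e == (i : Int) + 1) with
        | some e => if P ((i : Int) + 1) then (if i < L.length then some (val e (L[i]!)) else none) else L[i]?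
        | none => L[i]? := by
  induction es generalizing L with
  | nil => simp
  | cons e es ih =>
    obtain ⟨hni, hnd⟩ : (∀ x ∈ es, ¬ key x = key e) ∧ (es.map key).Nodup := by simpa using h
    have hne : ∀ e' ∈ es, key e' ≠ key e := fun e' he' hkey => hni e' he' hkey
    by_cases hk : key e = (i : Int) + 1
    · -- this entry targets row i; no later entry does
      have hfind : (e :: es).find? (fun e => key e == (i : Int) + 1) = some e := by
        simp [List.find?_cons, hk]
      rw [hfind]
      have hnone : es.find? (fun e => key e == (i : Int) + 1) = none := by
        apply List.find?_eq_none.mpr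
        intro e' he'
        simpa using fun hc => hne e' he' (by omega)
      by_cases hp : P (key e)
      · simp only [List.foldl_cons, if_pos hp]
        have hidx : (key e - 1).toNat = i := by omega
        rw [hidx, ih hnd, hnone]
        by_cases hi : i < L.length
        · have : (L.set i (val e (L[i]!)))[i]? = some (val e (L[i]!)) :=
            List.getElem?_set_eq_of_lt _ (by simpa using hi)
          rw [this, if_pos (hk ▸ hp), if_pos hi]
        · rw [List.set_eq_of_length_le (Nat.le_of_not_lt hi), if_pos (hk ▸ hp), if_neg hi]
          exact List.getElem?_eq_none (Nat.le_of_not_lt hi)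
      · simp only [List.foldl_cons, if_neg hp]
        rw [ih hnd, hnone, if_neg (hk ▸ hp)]
    · -- this entry does not target row i
      have hfind : (e :: es).find? (fun e => key e == (i : Int) + 1)
          = es.find? (fun e => key e == (i : Int) + 1) := by
        simp [List.find?_cons, hk]
      rw [hfind]
      by_cases hp : P (key e)
      · simp only [List.foldl_cons, if_pos hp]
        set L' := L.set (key e - 1).toNat (val e (L[(key e - 1).toNat]!)) with hL'
        have hlen : L'.length = L.length := by simp [hL']
        have hidxne : (key e - 1).toNat ≠ i := by
          have h1 := hP _ hp; omega
        have hget? : L'[i]? = L[i]? := by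
          rw [hL']; exact List.getElem?_set_ne hidxne
        have hget! : L'[i]! = L[i]! := by
          simp [List.getElem!_eq_getElem?_getD, hget?]
        rw [ih hnd]
        cases hes : es.find? (fun e => key e == (i : Int) + 1) with
        | none => simp [hget?]
        | some e' => simp [hlen, hget!, hget?]
      · simp only [List.foldl_cons, if_neg hp]
        exact ih hnd L

-- first-match lookup on the raw pairs list
theorem pvGetMkEqFind (al : List (Int × List (Int × Int))) (x : Int) :
    (PySem.Dict.mk al).get? x = (al.find? (fun e => e.1 == x)).map Prod.snd := by
  induction al with
  | nil => simp [PySem.Dict.get?]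
  | cons e al ih =>
    obtain ⟨k, v⟩ := e
    by_cases h : (k, v).1 = x
    · subst h
      simp [PySem.Dict.get?_mk_cons]
    · rw [PySem.Dict.get?_mk_cons, List.find?_cons_of_neg (by simpa using h)]
      simp only [beq_iff_eq, h, if_false]
      exact ih

theorem pvGetMkEqFindInt (d : List (Int × Int)) (x : Int) :
    (PySem.Dict.mk d).get? x = (d.find? (fun e => e.1 == x)).map Prod.snd := by
  induction d with
  | nil => simp [PySem.Dict.get?]
  | cons e d ih =>
    obtain ⟨k, v⟩ := e
    by_cases h : (k, v).1 = x
    · subst h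
      simp [PySem.Dict.get?_mk_cons]
    · rw [PySem.Dict.get?_mk_cons, List.find?_cons_of_neg (by simpa using h)]
      simp only [beq_iff_eq, h, if_false]
      exact ih

theorem pvContainsMkInt (d : List (Int × Int)) (x : Int) :
    (PySem.Dict.mk d).contains x = ((d.find? (fun e => e.1 == x)).map Prod.snd).isSome := by
  rw [PySem.Dict.contains_eq_isSome_get?, pvGetMkEqFindInt]

theorem pvContainsMk (al : List (Int × List (Int × Int))) (x : Int) :
    (PySem.Dict.mk al).contains x = ((al.find? (fun e => e.1 == x)).map Prod.snd).isSome := by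
  rw [PySem.Dict.contains_eq_isSome_get?, pvGetMkEqFind]

-- A's cell values in closed (map) form
def pvAW (adjacency_list : List (Int × List (Int × Int))) (i j : Int) : Int :=
  if i = j then 0
  else match adjacency_list.find? (fun e => e.1 == i + 1) with
    | some e =>
      match e.2.find? (fun p => p.1 == j + 1) with
      | some p => p.2
      | none => 9999
    | none => 9999

def pvAPI (adjacency_list : List (Int × List (Int × Int))) (i j : Int) : Int :=
  if i = j then 0
  else match adjacency_list.find? (fun e => e.1 == i + 1) with
    | some e =>
      match e.2.find? (fun p => p.1 == j + 1) with
      | some _ => i + 1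
      | none => 0
    | none => 0

theorem pvAeq (al : List (Int × List (Int × Int))) (n : Int) :
    create_w_matrix al n
      = ((PySem.List.pyRange 0 n 1).map (fun i => (PySem.List.pyRange 0 n 1).map (pvAW al i)),
         (PySem.List.pyRange 0 n 1).map (fun i => (PySem.List.pyRange 0 n 1).map (pvAPI al i))) := by
  unfold create_w_matrix
  have hrow : ∀ i : Int,
      (if (PySem.Dict.mk al).contains (i + 1) then
          let d : PySem.Dict Int Int := PySem.Dict.mk (((PySem.Dict.mk al).get? (i + 1)).getD [])
          (PySem.List.pyRange 0 n 1).foldl (fun rp j =>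
            if i == j then (rp.1 ++ [0], rp.2 ++ [0])
            else if d.contains (j + 1) then (rp.1 ++ [(d.get? (j + 1)).getD 0], rp.2 ++ [i + 1])
            else (rp.1 ++ [9999], rp.2 ++ [0])) ([], [])
        else
          (PySem.List.pyRange 0 n 1).foldl (fun rp j =>
            if i == j then (rp.1 ++ [0], rp.2 ++ [0]) else (rp.1 ++ [9999], rp.2 ++ [0])) ([], []))
      = ((PySem.List.pyRange 0 n 1).map (pvAW al i), (PySem.List.pyRange 0 n 1).map (pvAPI al i)) := by
    intro i
    rw [pvContainsMk, pvGetMkEqFind]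
    cases hf : al.find? (fun e => e.1 == i + 1) with
    | none =>
      show (PySem.List.pyRange 0 n 1).foldl _ ([], []) = _
      have hfun : (fun (rp : List Int × List Int) (j : Int) =>
            if i == j then (rp.1 ++ [0], rp.2 ++ [0]) else (rp.1 ++ [9999], rp.2 ++ [0]))
          = fun rp j => (rp.1 ++ [pvAW al i j], rp.2 ++ [pvAPI al i j]) := by
        funext rp j
        by_cases h : i = j <;> simp [pvAW, pvAPI, h, hf]
      rw [hfun, pvFoldAppend]; simp
    | some e =>
      simp only [Option.map_some]
      show (PySem.List.pyRange 0 n 1).foldl _ ([], []) = _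
      have hfun : (fun (rp : List Int × List Int) (j : Int) =>
            if i == j then (rp.1 ++ [0], rp.2 ++ [0])
            else if (PySem.Dict.mk ((some e.2).getD [])).contains (j + 1) then
              (rp.1 ++ [((PySem.Dict.mk ((some e.2).getD [])).get? (j + 1)).getD 0], rp.2 ++ [i + 1])
            else (rp.1 ++ [9999], rp.2 ++ [0]))
          = fun rp j => (rp.1 ++ [pvAW al i j], rp.2 ++ [pvAPI al i j]) := by
        funext rp j
        by_cases h : i = j
        · simp [pvAW, pvAPI, h]
        · rw [Option.getD_some, pvContainsMkInt, pvGetMkEqFindInt]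
          cases hg : e.2.find? (fun p => p.1 == j + 1) <;>
            simp [pvAW, pvAPI, h, hf, hg]
      rw [hfun, pvFoldAppend]; simp
  rw [pvFoldAppendGen (PySem.List.pyRange 0 n 1) _
      (fun i => (PySem.List.pyRange 0 n 1).map (pvAW al i))
      (fun i => (PySem.List.pyRange 0 n 1).map (pvAPI al i))
      (fun s i => by simp only [hrow i]) [] []]
  simp

-- B-side proof infrastructure: default matrices, per-row cell folds, pair/row splitting
def pvW0 (n : Int) : List (List Int) :=
  (PySem.List.pyRange 0 n 1).map (fun i => (PySem.List.pyRange 0 n 1).map (fun j => if i == j then 0 else 9999))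

def pvPI0 (n : Int) : List (List Int) :=
  (PySem.List.pyRange 0 n 1).map (fun _ => List.replicate n.toNat 0)

def pvRowW (n : Int) (e : Int × List (Int × Int)) (r : List Int) : List Int :=
  e.2.foldl (fun r p => if 1 ≤ p.1 ∧ p.1 ≤ n ∧ p.1 ≠ e.1 then r.set (p.1 - 1).toNat p.2 else r) r

def pvRowPI (n : Int) (e : Int × List (Int × Int)) (r : List Int) : List Int :=
  e.2.foldl (fun r p => if 1 ≤ p.1 ∧ p.1 ≤ n ∧ p.1 ≠ e.1 then r.set (p.1 - 1).toNat e.1 else r) r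

def pvBW (al : List (Int × List (Int × Int))) (n : Int) : List (List Int) :=
  al.foldl (fun L e => if 1 ≤ e.1 ∧ e.1 ≤ n then L.set (e.1 - 1).toNat (pvRowW n e (L[(e.1 - 1).toNat]!)) else L) (pvW0 n)

def pvBPI (al : List (Int × List (Int × Int))) (n : Int) : List (List Int) :=
  al.foldl (fun L e => if 1 ≤ e.1 ∧ e.1 ≤ n then L.set (e.1 - 1).toNat (pvRowPI n e (L[(e.1 - 1).toNat]!)) else L) (pvPI0 n)

theorem pvBsplit (al : List (Int × List (Int × Int))) (n : Int) :
    create_w_matrix_alt al n = (pvBW al n, pvBPI al n) := by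
  unfold create_w_matrix_alt pvBW pvBPI
  have hstep : (fun (WPI : List (List Int) × List (List Int)) (e : Int × List (Int × Int)) =>
      if 1 ≤ e.1 ∧ e.1 ≤ n then
        e.2.foldl (fun WPI p =>
          if 1 ≤ p.1 ∧ p.1 ≤ n ∧ p.1 ≠ e.1 then
            (WPI.1.set (e.1 - 1).toNat ((WPI.1[(e.1 - 1).toNat]!).set (p.1 - 1).toNat p.2),
             WPI.2.set (e.1 - 1).toNat ((WPI.2[(e.1 - 1).toNat]!).set (p.1 - 1).toNat e.1))
          else WPI) WPI
      else WPI)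
      = fun WPI e =>
        ((fun (L : List (List Int)) (e : Int × List (Int × Int)) =>
            if 1 ≤ e.1 ∧ e.1 ≤ n then L.set (e.1 - 1).toNat (pvRowW n e (L[(e.1 - 1).toNat]!)) else L) WPI.1 e,
         (fun (L : List (List Int)) (e : Int × List (Int × Int)) =>
            if 1 ≤ e.1 ∧ e.1 ≤ n then L.set (e.1 - 1).toNat (pvRowPI n e (L[(e.1 - 1).toNat]!)) else L) WPI.2 e) := by
    funext WPI e
    obtain ⟨W, P⟩ := WPI
    dsimp only
    by_cases hg : 1 ≤ e.1 ∧ e.1 ≤ n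
    · simp only [if_pos hg]
      have hin : (fun (WPI : List (List Int) × List (List Int)) (p : Int × Int) =>
          if 1 ≤ p.1 ∧ p.1 ≤ n ∧ p.1 ≠ e.1 then
            (WPI.1.set (e.1 - 1).toNat ((WPI.1[(e.1 - 1).toNat]!).set (p.1 - 1).toNat p.2),
             WPI.2.set (e.1 - 1).toNat ((WPI.2[(e.1 - 1).toNat]!).set (p.1 - 1).toNat e.1))
          else WPI)
          = fun WPI p =>
            ((fun (L : List (List Int)) (p : Int × Int) =>
               if 1 ≤ p.1 ∧ p.1 ≤ n ∧ p.1 ≠ e.1 then L.set (e.1 - 1).toNat ((L[(e.1 - 1).toNat]!).set (p.1 - 1).toNat p.2) else L) WPI.1 p,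
             (fun (L : List (List Int)) (p : Int × Int) =>
               if 1 ≤ p.1 ∧ p.1 ≤ n ∧ p.1 ≠ e.1 then L.set (e.1 - 1).toNat ((L[(e.1 - 1).toNat]!).set (p.1 - 1).toNat e.1) else L) WPI.2 p) := by
        funext WPI p
        dsimp only
        split_ifs <;> simp
      rw [hin, pvFoldPair e.2
        (fun (L : List (List Int)) (p : Int × Int) =>
          if 1 ≤ p.1 ∧ p.1 ≤ n ∧ p.1 ≠ e.1 then L.set (e.1 - 1).toNat ((L[(e.1 - 1).toNat]!).set (p.1 - 1).toNat p.2) else L)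
        (fun (L : List (List Int)) (p : Int × Int) =>
          if 1 ≤ p.1 ∧ p.1 ≤ n ∧ p.1 ≠ e.1 then L.set (e.1 - 1).toNat ((L[(e.1 - 1).toNat]!).set (p.1 - 1).toNat e.1) else L)
        W P,
        pvFoldRow e.2 ((e.1 - 1).toNat) (fun p => 1 ≤ p.1 ∧ p.1 ≤ n ∧ p.1 ≠ e.1)
          (fun p => (p.1 - 1).toNat) (fun p => p.2) W,
        pvFoldRow e.2 ((e.1 - 1).toNat) (fun p => 1 ≤ p.1 ∧ p.1 ≤ n ∧ p.1 ≠ e.1)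
          (fun p => (p.1 - 1).toNat) (fun _ => e.1) P]
      rfl
    · simp only [if_neg hg]
  rw [hstep, pvFoldPair al
    (fun (L : List (List Int)) (e : Int × List (Int × Int)) =>
      if 1 ≤ e.1 ∧ e.1 ≤ n then L.set (e.1 - 1).toNat (pvRowW n e (L[(e.1 - 1).toNat]!)) else L)
    (fun (L : List (List Int)) (e : Int × List (Int × Int)) =>
      if 1 ≤ e.1 ∧ e.1 ≤ n then L.set (e.1 - 1).toNat (pvRowPI n e (L[(e.1 - 1).toNat]!)) else L)]
  rfl

theorem pvRowWchar (n : Int) (e : Int × List (Int × Int)) (hnd : (e.2.map Prod.fst).Nodup)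
    (r : List Int) (j : ℕ) :
    (pvRowW n e r)[j]? = match e.2.find? (fun p => p.1 == (j : Int) + 1) with
      | some p => if (1 ≤ (j : Int) + 1 ∧ (j : Int) + 1 ≤ n ∧ (j : Int) + 1 ≠ e.1) then (if j < r.length then some p.2 else none) else r[j]?
      | none => r[j]? := by
  unfold pvRowW
  rw [pvFoldSetGet e.2 Prod.fst (fun p _ => p.2) (fun v => 1 ≤ v ∧ v ≤ n ∧ v ≠ e.1)
    (fun _ hk => hk.1) hnd r j]
  cases List.find? (fun p => p.1 == (j : Int) + 1) e.2 <;> rfl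

theorem pvRowPIchar (n : Int) (e : Int × List (Int × Int)) (hnd : (e.2.map Prod.fst).Nodup)
    (r : List Int) (j : ℕ) :
    (pvRowPI n e r)[j]? = match e.2.find? (fun p => p.1 == (j : Int) + 1) with
      | some _ => if (1 ≤ (j : Int) + 1 ∧ (j : Int) + 1 ≤ n ∧ (j : Int) + 1 ≠ e.1) then (if j < r.length then some e.1 else none) else r[j]?
      | none => r[j]? := by
  unfold pvRowPI
  rw [pvFoldSetGet e.2 Prod.fst (fun _ _ => e.1) (fun v => 1 ≤ v ∧ v ≤ n ∧ v ≠ e.1)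
    (fun _ hk => hk.1) hnd r j]
  cases List.find? (fun p => p.1 == (j : Int) + 1) e.2 <;> rfl

theorem pvBWchar (al : List (Int × List (Int × Int))) (n : Int)
    (h : (al.map Prod.fst).Nodup) (i : ℕ) :
    (pvBW al n)[i]? = match al.find? (fun e => e.1 == (i : Int) + 1) with
      | some e => if (1 ≤ (i : Int) + 1 ∧ (i : Int) + 1 ≤ n) then (if i < (pvW0 n).length then some (pvRowW n e ((pvW0 n)[i]!)) else none) else (pvW0 n)[i]?
      | none => (pvW0 n)[i]? := by
  unfold pvBW
  rw [pvFoldSetGet al Prod.fst (fun e r => pvRowW n e r) (fun k => 1 ≤ k ∧ k ≤ n)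
    (fun _ hk => hk.1) h (pvW0 n) i]
  cases List.find? (fun e => e.1 == (i : Int) + 1) al <;> rfl

theorem pvBPIchar (al : List (Int × List (Int × Int))) (n : Int)
    (h : (al.map Prod.fst).Nodup) (i : ℕ) :
    (pvBPI al n)[i]? = match al.find? (fun e => e.1 == (i : Int) + 1) with
      | some e => if (1 ≤ (i : Int) + 1 ∧ (i : Int) + 1 ≤ n) then (if i < (pvPI0 n).length then some (pvRowPI n e ((pvPI0 n)[i]!)) else none) else (pvPI0 n)[i]?
      | none => (pvPI0 n)[i]? := by
  unfold pvBPI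
  rw [pvFoldSetGet al Prod.fst (fun e r => pvRowPI n e r) (fun k => 1 ≤ k ∧ k ≤ n)
    (fun _ hk => hk.1) h (pvPI0 n) i]
  cases List.find? (fun e => e.1 == (i : Int) + 1) al <;> rfl

theorem pvMapRangeGet {β : Type} (f : Int → β) (n : Int) (i : ℕ) (hi : (i : Int) < n) :
    ((PySem.List.pyRange 0 n 1).map f)[i]? = some (f (i : Int)) := by
  rw [PySem.List.pyRange_one, List.map_map, List.getElem?_map, List.getElem?_range (by omega)]
  simp

theorem pvW0len (n : Int) : (pvW0 n).length = n.toNat := by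
  simp [pvW0, PySem.List.length_pyRange_one]

theorem pvPI0len (n : Int) : (pvPI0 n).length = n.toNat := by
  simp [pvPI0, PySem.List.length_pyRange_one]

theorem pvW0get (n : Int) (i : ℕ) (hi : (i : Int) < n) :
    (pvW0 n)[i]? = some ((PySem.List.pyRange 0 n 1).map (fun j => if ((i : Int) == j) then (0 : Int) else 9999)) := by
  unfold pvW0
  exact pvMapRangeGet _ _ _ hi

theorem pvPI0get (n : Int) (i : ℕ) (hi : (i : Int) < n) :
    (pvPI0 n)[i]? = some (List.replicate n.toNat 0) := by
  unfold pvPI0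
  exact pvMapRangeGet _ _ _ hi

theorem pvWside (al : List (Int × List (Int × Int))) (n : Int)
    (hnodup : (al.map Prod.fst).Nodup)
    (hinner : ∀ e ∈ al, (e.2.map Prod.fst).Nodup) :
    (PySem.List.pyRange 0 n 1).map (fun i => (PySem.List.pyRange 0 n 1).map (pvAW al i)) = pvBW al n := by
  apply List.ext_getElem?
  intro i
  rw [pvBWchar al n hnodup i]
  by_cases hi : i < n.toNat
  · have hii : (i : Int) < n := by omega
    rw [pvMapRangeGet _ _ _ hii]
    cases hf : al.find? (fun e => e.1 == (i : Int) + 1) with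
    | none =>
      dsimp only
      rw [pvW0get n i hii]
      refine congrArg some ?_
      apply List.map_congr_left
      intro j hj
      by_cases h : (i : Int) = j <;> simp [pvAW, h, hf]
    | some e =>
      dsimp only
      have hP : (1 ≤ (i : Int) + 1 ∧ (i : Int) + 1 ≤ n) := ⟨by omega, by omega⟩
      rw [if_pos hP, if_pos (by rw [pvW0len]; exact hi)]
      have hW0 : (pvW0 n)[i]! = (PySem.List.pyRange 0 n 1).map (fun j => if ((i : Int) == j) then (0 : Int) else 9999) := by
        simp [List.getElem!_eq_getElem?_getD, pvW0get n i hii]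
      rw [hW0]
      refine congrArg some ?_
      have hkey : e.1 = (i : Int) + 1 := by simpa using List.find?_some hf
      have hmem : e ∈ al := List.mem_of_find?_eq_some hf
      apply List.ext_getElem?
      intro j
      rw [pvRowWchar n e (hinner e hmem) _ j]
      have hrlen : ((PySem.List.pyRange 0 n 1).map (fun j => if ((i : Int) == j) then (0 : Int) else 9999)).length = n.toNat := by
        simp [PySem.List.length_pyRange_one]
      by_cases hj : j < n.toNat
      · have hjj : (j : Int) < n := by omega
        rw [pvMapRangeGet _ _ _ hjj]
        cases hg : e.2.find? (fun p => p.1 == (j : Int) + 1) with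
        | none =>
          dsimp only
          rw [pvMapRangeGet _ _ _ hjj]
          refine congrArg some ?_
          by_cases h : (i : Int) = (j : Int) <;> simp [pvAW, h, hf, hg]
        | some p =>
          dsimp only
          by_cases hij : i = j
          · subst hij
            rw [if_neg (by simp [hkey])]
            rw [pvMapRangeGet _ _ _ hjj]
            refine congrArg some ?_
            simp [pvAW]
          · have hcond : (1 ≤ (j : Int) + 1 ∧ (j : Int) + 1 ≤ n ∧ (j : Int) + 1 ≠ e.1) := by
              refine ⟨by omega, by omega, ?_⟩
              rw [hkey]
              intro hc
              exact hij (by omega)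
            rw [if_pos hcond, if_pos (show j < _ by simp [PySem.List.length_pyRange_one]; omega)]
            refine congrArg some ?_
            have h' : ¬ ((i : Int) = (j : Int)) := fun hc => hij (by omega)
            simp [pvAW, h', hf, hg]
      · have hL : ((PySem.List.pyRange 0 n 1).map (pvAW al (i : Int)))[j]? = none := by
          apply List.getElem?_eq_none
          simp [PySem.List.length_pyRange_one]
          omega
        have hr : ((PySem.List.pyRange 0 n 1).map (fun j => if ((i : Int) == j) then (0 : Int) else 9999))[j]? = none := by
          apply List.getElem?_eq_none
          simp [PySem.List.length_pyRange_one]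
          omega
        have hnlt : ¬ j < ((PySem.List.pyRange 0 n 1).map (fun j => if ((i : Int) == j) then (0 : Int) else 9999)).length := by
          simp [PySem.List.length_pyRange_one]
          omega
        rw [hL]
        cases hg : e.2.find? (fun p => p.1 == (j : Int) + 1) with
        | none => exact hr.symm
        | some p =>
          dsimp only
          rw [if_neg hnlt]
          split_ifs
          · rfl
          · exact hr.symm
  · have hlhs : ((PySem.List.pyRange 0 n 1).map (fun i => (PySem.List.pyRange 0 n 1).map (pvAW al i)))[i]? = none := by
      apply List.getElem?_eq_none
      simp [PySem.List.length_pyRange_one]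
      omega
    have hW0n : (pvW0 n)[i]? = none := by
      apply List.getElem?_eq_none
      rw [pvW0len]; omega
    cases hf : al.find? (fun e => e.1 == (i : Int) + 1) with
    | none => dsimp only; rw [hlhs, hW0n]
    | some e =>
      dsimp only
      rw [hlhs]
      split_ifs with h1 h2
      · omega
      · rfl
      · exact hW0n.symm

theorem pvPIside (al : List (Int × List (Int × Int))) (n : Int)
    (hnodup : (al.map Prod.fst).Nodup)
    (hinner : ∀ e ∈ al, (e.2.map Prod.fst).Nodup) :
    (PySem.List.pyRange 0 n 1).map (fun i => (PySem.List.pyRange 0 n 1).map (pvAPI al i)) = pvBPI al n := by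
  apply List.ext_getElem?
  intro i
  rw [pvBPIchar al n hnodup i]
  by_cases hi : i < n.toNat
  · have hii : (i : Int) < n := by omega
    rw [pvMapRangeGet _ _ _ hii]
    cases hf : al.find? (fun e => e.1 == (i : Int) + 1) with
    | none =>
      dsimp only
      rw [pvPI0get n i hii]
      refine congrArg some ?_
      have : ∀ j ∈ PySem.List.pyRange 0 n 1, pvAPI al (i : Int) j = 0 := by
        intro j hj
        by_cases h : (i : Int) = j <;> simp [pvAPI, h, hf]
      rw [List.map_congr_left this]
      simp [List.eq_replicate_iff]
    | some e =>
      dsimp only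
      have hP : (1 ≤ (i : Int) + 1 ∧ (i : Int) + 1 ≤ n) := ⟨by omega, by omega⟩
      rw [if_pos hP, if_pos (by rw [pvPI0len]; exact hi)]
      have hPI0 : (pvPI0 n)[i]! = List.replicate n.toNat (0 : Int) := by
        simp [List.getElem!_eq_getElem?_getD, pvPI0get n i hii]
      rw [hPI0]
      refine congrArg some ?_
      have hkey : e.1 = (i : Int) + 1 := by simpa using List.find?_some hf
      have hmem : e ∈ al := List.mem_of_find?_eq_some hf
      apply List.ext_getElem?
      intro j
      rw [pvRowPIchar n e (hinner e hmem) _ j]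
      have hrlen : (List.replicate n.toNat (0 : Int)).length = n.toNat := by simp
      by_cases hj : j < n.toNat
      · have hjj : (j : Int) < n := by omega
        rw [pvMapRangeGet _ _ _ hjj]
        cases hg : e.2.find? (fun p => p.1 == (j : Int) + 1) with
        | none =>
          dsimp only
          rw [List.getElem?_replicate_of_lt hj]
          refine congrArg some ?_
          by_cases h : (i : Int) = (j : Int) <;> simp [pvAPI, h, hf, hg]
        | some p =>
          dsimp only
          by_cases hij : i = j
          · subst hij
            rw [if_neg (by simp [hkey])]
            rw [List.getElem?_replicate_of_lt hj]
            refine congrArg some ?_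
            simp [pvAPI]
          · have hcond : (1 ≤ (j : Int) + 1 ∧ (j : Int) + 1 ≤ n ∧ (j : Int) + 1 ≠ e.1) := by
              refine ⟨by omega, by omega, ?_⟩
              rw [hkey]
              intro hc
              exact hij (by omega)
            rw [if_pos hcond, if_pos (show j < _ by simp [PySem.List.length_pyRange_one]; omega)]
            refine congrArg some ?_
            have h' : ¬ ((i : Int) = (j : Int)) := fun hc => hij (by omega)
            rw [hkey]
            simp [pvAPI, h', hf, hg]
      · have hL : ((PySem.List.pyRange 0 n 1).map (pvAPI al (i : Int)))[j]? = none := by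
          apply List.getElem?_eq_none
          simp [PySem.List.length_pyRange_one]
          omega
        have hr : (List.replicate n.toNat (0 : Int))[j]? = none := by
          apply List.getElem?_eq_none
          simp; omega
        have hnlt : ¬ j < (List.replicate n.toNat (0 : Int)).length := by
          simp; omega
        rw [hL]
        cases hg : e.2.find? (fun p => p.1 == (j : Int) + 1) with
        | none => exact hr.symm
        | some p =>
          dsimp only
          rw [if_neg hnlt]
          split_ifs
          · rfl
          · exact hr.symm
  · have hlhs : ((PySem.List.pyRange 0 n 1).map (fun i => (PySem.List.pyRange 0 n 1).map (pvAPI al i)))[i]? = none := by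
      apply List.getElem?_eq_none
      simp [PySem.List.length_pyRange_one]
      omega
    have hPI0n : (pvPI0 n)[i]? = none := by
      apply List.getElem?_eq_none
      rw [pvPI0len]; omega
    cases hf : al.find? (fun e => e.1 == (i : Int) + 1) with
    | none => dsimp only; rw [hlhs, hPI0n]
    | some e =>
      dsimp only
      rw [hlhs]
      split_ifs with h1 h2
      · omega
      · rfl
      · exact hPI0n.symm

-- ===== VERDICT (by name: the statement is the Claim_ definition above) =====
theorem create_w_matrix_spec : Claim_equal_create_w_matrix := by
  intro al n _ hpre
  unfold Spec_create_w_matrix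
  obtain ⟨hnodup, hinner⟩ := hpre
  rw [pvAeq, pvBsplit]
  exact Prod.ext (pvWside al n hnodup hinner) (pvPIside al n hnodup hinner)
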